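-- pv_equiv track=rewrite | github.com/AbdulHannan-HAH/domantion-number-calculator | graph_module.py | generate_semigroup
-- ===== SOURCE A (Python) =====
-- from collections import deque
--
-- def generate_semigroup(generators, limit_factor=20):
--     """Generate numerical semigroup S = <generators> efficiently."""
--     m = min(generators)
--     max_check = max(generators) * limit_factor
--     S = set()
--     frontier = deque([0])
--
--     while frontier:
--         current = frontier.popleft()
--         if current > max_check or current in S:
--             continue
--         S.add(current)
--         for g in generators:
--             nxt = current + g
--             if nxt <= max_check:
--                 frontier.append(nxt)
--     return S
-- ===== SOURCE B (Python) =====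
-- def generate_semigroup(generators, limit_factor=20):
--     """Generate numerical semigroup S = <generators> via an ascending boolean sieve."""
--     max_check = max(generators) * limit_factor
--     if max_check < 0:
--         return set()
--     reachable = [False] * (max_check + 1)
--     reachable[0] = True
--     for i in range(max_check + 1):
--         if reachable[i]:
--             for g in generators:
--                 if i + g <= max_check:
--                     reachable[i + g] = True
--     return {i for i in range(max_check + 1) if reachable[i]}
-- ===== Notes on version B (the rewrite author's own statement) =====
-- stated objective: alternative
-- what changed: The deque BFS over a hash set is replaced by a single ascending boolean-array sieve: mark position zero reachable, sweep upward once marking i+g for every generator g whenever i is already marked, then collect the marked indices.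
import Mathlib
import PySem

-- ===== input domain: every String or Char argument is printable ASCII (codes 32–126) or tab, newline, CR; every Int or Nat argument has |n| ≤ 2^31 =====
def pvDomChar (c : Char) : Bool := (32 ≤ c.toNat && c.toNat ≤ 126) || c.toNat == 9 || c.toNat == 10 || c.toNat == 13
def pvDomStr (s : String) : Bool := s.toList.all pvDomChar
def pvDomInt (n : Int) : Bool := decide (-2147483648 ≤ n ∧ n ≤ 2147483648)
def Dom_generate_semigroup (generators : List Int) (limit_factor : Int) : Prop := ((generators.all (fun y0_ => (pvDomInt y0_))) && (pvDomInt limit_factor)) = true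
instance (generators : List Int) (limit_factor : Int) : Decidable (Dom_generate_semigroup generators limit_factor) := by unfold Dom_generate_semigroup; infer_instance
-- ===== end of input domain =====

-- B replaces A's deque BFS over a hash set by an ascending boolean-array sieve (same set of
-- reachable sums); equivalence is about the returned SET of values (Python set order is not
-- modelled: both ports return the set's ascending enumeration).


-- ===== PORT A =====
-- inner 'for g in generators: … frontier.append(nxt)' of A's while-loop
def pushNext (G : List Int) (M c : Int) (fr : List Int) : List Int :=
  G.foldl (fun f g => if c + g ≤ M then f ++ [c + g] else f) fr

-- A's 'while frontier:' loop, step for step; the fuel is only a totality guard (a bound on the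
-- number of iterations, proved sufficient below under Pre_): pop left, skip if > max_check or
-- already in S, else add to S and append the successors.
def bfsA (G : List Int) (M : Int) : Nat → List Int → PySem.Set Int → PySem.Set Int
  | 0, _, S => S
  | _ + 1, [], S => S
  | fuel + 1, c :: rest, S =>
    if M < c ∨ c ∈ S then bfsA G M fuel rest S
    else bfsA G M fuel (pushNext G M c rest) (PySem.Set.add S c)

-- Python A returns a set (iteration order not modelled): the port returns the set's canonical
-- ascending enumeration, an order-insensitive reading of the same set value.
def generate_semigroup (generators : List Int) (limit_factor : Int) : List Int :=
  match PySem.List.min? generators (fun y => y), PySem.List.max? generators (fun y => y) with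
  | some _, some mx =>
    let M := mx * limit_factor
    PySem.List.sorted
      (bfsA generators M ((generators.length + 1) * (M + 1).toNat + 2) [0] PySem.Set.empty)
      (fun y => y)
  | _, _ => []  -- min()/max() of an empty list raise ValueError in Python; excluded by Pre_

-- ===== PORT B =====
-- inner 'for g in generators: if i + g <= max_check: reachable[i + g] = True' of B's sweep
def sieveStep (G : List Int) (M i : Int) (a : List Bool) : List Bool :=
  G.foldl (fun a g => if i + g ≤ M then PySem.List.pySetD a (i + g) true else a) a

def generate_semigroup_alt (generators : List Int) (limit_factor : Int) : List Int :=
  match PySem.List.max? generators (fun y => y) with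
  | none => []  -- max() of an empty list raises ValueError in Python; excluded by Pre_
  | some mx =>
    let M := mx * limit_factor
    if M < 0 then []
    else
      let arr := (PySem.List.pyRange 0 (M + 1)).foldl
        (fun a i => if PySem.List.pyGetD a i false then sieveStep generators M i a else a)
        (PySem.List.pySetD (List.replicate (M + 1).toNat false) 0 true)
      PySem.Set.ofList
        ((PySem.List.pyRange 0 (M + 1)).filter (fun i => PySem.List.pyGetD arr i false))

-- ===== PRECONDITION & SPEC =====
-- A raises ValueError on an empty generator list, and its BFS loop does not terminate when some
-- generator is negative while the bound max(generators)*limit_factor is nonnegative; Pre_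
-- excludes exactly those inputs and nothing else.
def Pre_generate_semigroup (generators : List Int) (limit_factor : Int) : Prop :=
  generators ≠ [] ∧
    ((∀ g ∈ generators, 0 ≤ g) ∨
      ((PySem.List.max? generators (fun y => y)).getD 0) * limit_factor < 0)
instance (generators : List Int) (limit_factor : Int) : Decidable (Pre_generate_semigroup generators limit_factor) := by unfold Pre_generate_semigroup; infer_instance

def pvWitness_generate_semigroup : List Int × Int := ([3, 5], 4)

def Spec_generate_semigroup (generators : List Int) (limit_factor : Int) (out : List Int) : Prop := out = generate_semigroup_alt generators limit_factor
instance (generators : List Int) (limit_factor : Int) (out : List Int) : Decidable (Spec_generate_semigroup generators limit_factor out) := by unfold Spec_generate_semigroup; infer_instance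

-- ===== CLAIM (what is proved, stated in full; the proofs are below) =====
def Claim_equal_generate_semigroup : Prop := ∀ (generators : List Int) (limit_factor : Int), Dom_generate_semigroup generators limit_factor → Pre_generate_semigroup generators limit_factor → Spec_generate_semigroup generators limit_factor (generate_semigroup generators limit_factor)

-- ===== LEMMAS AND PROOFS =====

-- the sums of multisets of generators ("reachable" values of both programs)
inductive Reach (G : List Int) : Int → Prop
  | zero : Reach G 0
  | step {m g : Int} : Reach G m → g ∈ G → Reach G (m + g)

theorem reach_nonneg {G : List Int} (hG : ∀ g ∈ G, 0 ≤ g) {x : Int} (h : Reach G x) : 0 ≤ x := by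
  induction h with
  | zero => omega
  | step _ hg ih => have := hG _ hg; omega

theorem reach_strip {G : List Int} (hG : ∀ g ∈ G, 0 ≤ g) {x : Int} (h : Reach G x) :
    x = 0 ∨ ∃ m g, Reach G m ∧ g ∈ G ∧ 0 < g ∧ x = m + g := by
  induction h with
  | zero => exact Or.inl rfl
  | @step m g hm hg ih =>
    by_cases hg0 : g = 0
    · subst hg0; simpa using ih
    · exact Or.inr ⟨m, g, hm, hg, by have := hG _ hg; omega, rfl⟩

theorem nodup_Icc_length_le {M : Int} {S : List Int} (hnd : S.Nodup)
    (hb : ∀ x ∈ S, 0 ≤ x ∧ x ≤ M) : S.length ≤ (M + 1).toNat := by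
  classical
  have h1 : S.toFinset.card = S.length := List.toFinset_card_of_nodup hnd
  have h2 : S.toFinset ⊆ Finset.Icc 0 M := by
    intro x hx
    rw [List.mem_toFinset] at hx
    have := hb x hx
    rw [Finset.mem_Icc]; omega
  have h3 := Finset.card_le_card h2
  rw [Int.card_Icc] at h3
  omega

theorem pushNext_eq (G : List Int) (M c : Int) (fr : List Int) :
    pushNext G M c fr
      = fr ++ (G.filter (fun g => decide (c + g ≤ M))).map (fun g => c + g) :=
  PySem.List.foldl_append_ite (fun g => c + g ≤ M) (fun g => c + g) G fr

theorem mem_pushNext {G : List Int} {M c : Int} {fr : List Int} {x : Int} :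
    x ∈ pushNext G M c fr ↔ x ∈ fr ∨ ∃ g ∈ G, c + g ≤ M ∧ x = c + g := by
  rw [pushNext_eq]
  simp only [List.mem_append, List.mem_map, List.mem_filter, decide_eq_true_eq]
  constructor
  · rintro (h | ⟨g, ⟨hg, hle⟩, rfl⟩)
    · exact Or.inl h
    · exact Or.inr ⟨g, hg, hle, rfl⟩
  · rintro (h | ⟨g, hg, hle, rfl⟩)
    · exact Or.inl h
    · exact Or.inr ⟨g, ⟨hg, hle⟩, rfl⟩

def bfsMeasure (G : List Int) (M : Int) (fr S : List Int) : Nat :=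
  fr.length + (G.length + 1) * ((M + 1).toNat - S.length)

def BfsInv (G : List Int) (M : Int) (fr S : List Int) : Prop :=
  S.Nodup ∧ (∀ c ∈ fr, 0 ≤ c ∧ Reach G c) ∧
  (∀ x ∈ S, 0 ≤ x ∧ x ≤ M ∧ Reach G x) ∧
  (∀ c ∈ S, ∀ g ∈ G, c + g ≤ M → (c + g ∈ S ∨ c + g ∈ fr))

theorem bfsA_main (G : List Int) (M : Int) (hG : ∀ g ∈ G, 0 ≤ g) :
    ∀ (fuel : Nat) (fr S : List Int), bfsMeasure G M fr S ≤ fuel → BfsInv G M fr S →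
      (∀ x ∈ S, x ∈ bfsA G M fuel fr S) ∧
      (∀ c ∈ fr, c ≤ M → c ∈ bfsA G M fuel fr S) ∧
      (∀ x ∈ bfsA G M fuel fr S, 0 ≤ x ∧ x ≤ M ∧ Reach G x) ∧
      (∀ c ∈ bfsA G M fuel fr S, ∀ g ∈ G, c + g ≤ M → c + g ∈ bfsA G M fuel fr S) ∧
      (bfsA G M fuel fr S).Nodup := by
  intro fuel
  induction fuel with
  | zero =>
    intro fr S hmu hI
    obtain ⟨hnd, hfr, hS, hcl⟩ := hI
    have hfr0 : fr = [] := by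
      have : fr.length = 0 := by unfold bfsMeasure at hmu; omega
      exact List.eq_nil_of_length_eq_zero this
    subst hfr0
    show (∀ x ∈ S, x ∈ S) ∧ _
    refine ⟨fun x hx => hx, by simp, hS, ?_, hnd⟩
    intro c hc g hg hle
    rcases hcl c hc g hg hle with h | h
    · exact h
    · simp at h
  | succ fuel ih =>
    intro fr S hmu hI
    obtain ⟨hnd, hfr, hS, hcl⟩ := hI
    cases fr with
    | nil =>
      show (∀ x ∈ S, x ∈ S) ∧ _
      refine ⟨fun x hx => hx, by simp, hS, ?_, hnd⟩
      intro c hc g hg hle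
      rcases hcl c hc g hg hle with h | h
      · exact h
      · simp at h
    | cons c rest =>
      by_cases hc : M < c ∨ c ∈ S
      · have hbfs : bfsA G M (fuel + 1) (c :: rest) S = bfsA G M fuel rest S := by
          rw [bfsA, if_pos hc]
        rw [hbfs]
        have hmu' : bfsMeasure G M rest S ≤ fuel := by
          unfold bfsMeasure at hmu ⊢
          simp only [List.length_cons] at hmu
          omega
        have hI' : BfsInv G M rest S := by
          refine ⟨hnd, fun c' h => hfr c' (List.mem_cons_of_mem _ h), hS, ?_⟩
          intro c' hc' g hg hle
          rcases hcl c' hc' g hg hle with h | h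
          · exact Or.inl h
          · rcases List.mem_cons.mp h with heq | h2
            · rcases hc with hMc | hcS
              · omega
              · exact Or.inl (heq ▸ hcS)
            · exact Or.inr h2
        obtain ⟨i1, i2, i3, i4, i5⟩ := ih rest S hmu' hI'
        refine ⟨i1, ?_, i3, i4, i5⟩
        intro c' hc' hcM
        rcases List.mem_cons.mp hc' with rfl | h2
        · rcases hc with hMc | hcS
          · omega
          · exact i1 _ hcS
        · exact i2 _ h2 hcM
      · obtain ⟨hcM0, hcS⟩ := not_or.mp hc
        have hcM : c ≤ M := by omega
        have hadd : PySem.Set.add S c = S ++ [c] := PySem.Set.add_of_not_mem hcS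
        have hbfs : bfsA G M (fuel + 1) (c :: rest) S
            = bfsA G M fuel (pushNext G M c rest) (S ++ [c]) := by
          rw [bfsA, if_neg (not_or.mpr ⟨by omega, hcS⟩), hadd]
        rw [hbfs]
        have hc0 : 0 ≤ c := (hfr c List.mem_cons_self).1
        have hRc : Reach G c := (hfr c List.mem_cons_self).2
        have hcM' : c ≤ M := by omega
        have hnd' : (S ++ [c]).Nodup := by
          rw [List.nodup_append]
          refine ⟨hnd, List.nodup_singleton c, ?_⟩
          intro a ha b hb
          simp only [List.mem_singleton] at hb
          subst hb
          exact fun h => hcS (h ▸ ha)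
        have hSb : ∀ x ∈ S ++ [c], 0 ≤ x ∧ x ≤ M := by
          intro x hx
          rcases List.mem_append.mp hx with h | h
          · exact ⟨(hS x h).1, (hS x h).2.1⟩
          · simp only [List.mem_singleton] at h; subst h; exact ⟨hc0, hcM'⟩
        have hlenS : (S ++ [c]).length ≤ (M + 1).toNat := nodup_Icc_length_le hnd' hSb
        have hmu' : bfsMeasure G M (pushNext G M c rest) (S ++ [c]) ≤ fuel := by
          have hpl : (pushNext G M c rest).length ≤ rest.length + G.length := by
            rw [pushNext_eq, List.length_append, List.length_map]
            have := List.length_filter_le (fun g => decide (c + g ≤ M)) G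
            omega
          unfold bfsMeasure at hmu ⊢
          simp only [List.length_cons, List.length_append, List.length_nil] at hmu hlenS ⊢
          set r := (M + 1).toNat - S.length with hr
          have hr1 : 1 ≤ r := by omega
          have hP : (G.length + 1) * r = (G.length + 1) * (r - 1) + (G.length + 1) := by
            have h2 : r = (r - 1) + 1 := by omega
            calc (G.length + 1) * r = (G.length + 1) * ((r - 1) + 1) := by rw [← h2]
              _ = (G.length + 1) * (r - 1) + (G.length + 1) := by ring
          have hinner : (M + 1).toNat - (S.length + 1) = r - 1 := by omega
          rw [hinner]
          omega
        have hI' : BfsInv G M (pushNext G M c rest) (S ++ [c]) := by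
          refine ⟨hnd', ?_, ?_, ?_⟩
          · intro x hx
            rcases mem_pushNext.mp hx with h | ⟨g, hg, hle, rfl⟩
            · exact hfr x (List.mem_cons_of_mem _ h)
            · exact ⟨by have := hG g hg; omega, Reach.step hRc hg⟩
          · intro x hx
            rcases List.mem_append.mp hx with h | h
            · exact hS x h
            · simp only [List.mem_singleton] at h; subst h; exact ⟨hc0, hcM', hRc⟩
          · intro c' hc' g hg hle
            rcases List.mem_append.mp hc' with h | h
            · rcases hcl c' h g hg hle with h2 | h2
              · exact Or.inl (List.mem_append_left _ h2)
              · rcases List.mem_cons.mp h2 with heq | h3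
                · exact Or.inl (List.mem_append_right _ (by simp [heq]))
                · exact Or.inr (mem_pushNext.mpr (Or.inl h3))
            · simp only [List.mem_singleton] at h
              subst h
              exact Or.inr (mem_pushNext.mpr (Or.inr ⟨g, hg, hle, rfl⟩))
        obtain ⟨i1, i2, i3, i4, i5⟩ := ih _ _ hmu' hI'
        refine ⟨?_, ?_, i3, i4, i5⟩
        · intro x hx
          exact i1 x (List.mem_append_left _ hx)
        · intro c' hc' hcM2
          rcases List.mem_cons.mp hc' with rfl | h2
          · exact i1 _ (List.mem_append_right _ (by simp))
          · exact i2 _ (mem_pushNext.mpr (Or.inl h2)) hcM2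

theorem bfsA_spec (G : List Int) (M : Int) (hG : ∀ g ∈ G, 0 ≤ g) :
    (∀ x, x ∈ bfsA G M ((G.length + 1) * (M + 1).toNat + 2) [0] PySem.Set.empty
      ↔ (Reach G x ∧ x ≤ M)) ∧
    (bfsA G M ((G.length + 1) * (M + 1).toNat + 2) [0] PySem.Set.empty).Nodup := by
  have hmu0 : bfsMeasure G M [0] [] ≤ (G.length + 1) * (M + 1).toNat + 2 := by
    unfold bfsMeasure
    simp only [List.length_singleton, List.length_nil, Nat.sub_zero]
    omega
  have hI0 : BfsInv G M [0] [] := by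
    refine ⟨List.nodup_nil, ?_, by simp, by simp⟩
    intro c hc
    simp only [List.mem_singleton] at hc
    subst hc
    exact ⟨le_refl 0, Reach.zero⟩
  obtain ⟨i1, i2, i3, i4, i5⟩ := bfsA_main G M hG _ [0] [] hmu0 hI0
  refine ⟨fun x => ⟨fun hx => ⟨(i3 x hx).2.2, (i3 x hx).2.1⟩, ?_⟩, i5⟩
  rintro ⟨hR, hle⟩
  revert hle
  induction hR with
  | zero => intro h0; exact i2 0 (by simp) h0
  | @step m g hm hg ihm =>
    intro hle
    have hmle : m ≤ M := by have := hG g hg; omega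
    exact i4 m (ihm hmle) g hg hle

theorem bfsA_of_neg (G : List Int) (M : Int) (hM : M < 0) (f : Nat) :
    bfsA G M (f + 2) [0] PySem.Set.empty = [] := by
  show bfsA G M (f + 1 + 1) [0] [] = []
  rw [bfsA]
  simp only [List.not_mem_nil, or_false, if_pos hM]
  cases f <;> rfl

-- ----- sieve side -----

theorem length_sieveStep (G : List Int) (M i : Int) (a : List Bool) :
    (sieveStep G M i a).length = a.length := by
  suffices h : ∀ (l : List Int) (b : List Bool),
      (l.foldl (fun a g => if i + g ≤ M then PySem.List.pySetD a (i + g) true else a) b).length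
        = b.length from h G a
  intro l
  induction l with
  | nil => intro b; rfl
  | cons g t ih =>
    intro b
    rw [List.foldl_cons, ih]
    split <;> simp [PySem.List.length_pySetD]

theorem getD_pySetD_int (a : List Bool) (i j : Int) (v d : Bool) (hi0 : 0 ≤ i)
    (hi : i < (a.length : Int)) (hj : 0 ≤ j) :
    PySem.List.pyGetD (PySem.List.pySetD a i v) j d
      = if j = i then v else PySem.List.pyGetD a j d := by
  rw [PySem.List.pySetD_of_nonneg a v hi0, PySem.List.pyGetD_of_nonneg _ d hj,
    PySem.List.pyGetD_of_nonneg a d hj]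
  by_cases h : j = i
  · subst h
    have hlt : j.toNat < a.length := by omega
    simp [List.getD_eq_getElem?_getD, hlt]
  · have hne : j.toNat ≠ i.toNat := by omega
    simp [List.getD_eq_getElem?_getD, h, Ne.symm hne]

theorem getD_sieveStep (G : List Int) (M : Int) (hG : ∀ g ∈ G, 0 ≤ g) (i : Int) (hi0 : 0 ≤ i) :
    ∀ (a : List Bool), (a.length : Int) = M + 1 → ∀ j : Int, 0 ≤ j →
    (PySem.List.pyGetD (sieveStep G M i a) j false = true ↔
      (PySem.List.pyGetD a j false = true ∨ ∃ g ∈ G, i + g ≤ M ∧ j = i + g)) := by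
  suffices h : ∀ (l : List Int), (∀ g ∈ l, 0 ≤ g) → ∀ (a : List Bool),
      (a.length : Int) = M + 1 → ∀ j : Int, 0 ≤ j →
      (PySem.List.pyGetD
          (l.foldl (fun a g => if i + g ≤ M then PySem.List.pySetD a (i + g) true else a) a)
          j false = true ↔
        (PySem.List.pyGetD a j false = true ∨ ∃ g ∈ l, i + g ≤ M ∧ j = i + g)) from
    fun a ha j hj => h G hG a ha j hj
  intro l hl
  induction l with
  | nil => intro a ha j hj; simp
  | cons g t ih =>
    intro a ha j hj
    rw [List.foldl_cons]
    have hg0 : 0 ≤ g := hl g List.mem_cons_self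
    have ht : ∀ x ∈ t, 0 ≤ x := fun x hx => hl x (List.mem_cons_of_mem _ hx)
    by_cases hle : i + g ≤ M
    · have ha' : (((PySem.List.pySetD a (i + g) true)).length : Int) = M + 1 := by
        rw [PySem.List.length_pySetD]; exact ha
      rw [if_pos hle, ih ht _ ha' j hj,
        getD_pySetD_int a (i + g) j true false (by omega) (by omega) hj]
      by_cases hji : j = i + g
      · rw [if_pos hji]
        constructor
        · intro _
          exact Or.inr ⟨g, List.mem_cons_self, hle, hji⟩
        · intro _
          exact Or.inl rfl
      · rw [if_neg hji]
        simp only [List.mem_cons]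
        constructor
        · rintro (h | ⟨g', hg', hle', rfl⟩)
          · exact Or.inl h
          · exact Or.inr ⟨g', Or.inr hg', hle', rfl⟩
        · rintro (h | ⟨g', hg'', hle', rfl⟩)
          · exact Or.inl h
          · rcases hg'' with heq | hg'
            · exact absurd (by rw [heq]) hji
            · exact Or.inr ⟨g', hg', hle', rfl⟩
    · rw [if_neg hle, ih ht a ha j hj]
      simp only [List.mem_cons]
      constructor
      · rintro (h | ⟨g', hg', hle', rfl⟩)
        · exact Or.inl h
        · exact Or.inr ⟨g', Or.inr hg', hle', rfl⟩
      · rintro (h | ⟨g', hg'', hle', rfl⟩)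
        · exact Or.inl h
        · rcases hg'' with heq | hg'
          · exact absurd (heq ▸ hle') hle
          · exact Or.inr ⟨g', hg', hle', rfl⟩

def sieveArr (G : List Int) (M : Int) : Nat → List Bool
  | 0 => PySem.List.pySetD (List.replicate (M + 1).toNat false) 0 true
  | k + 1 =>
    if PySem.List.pyGetD (sieveArr G M k) (k : Int) false
      then sieveStep G M (k : Int) (sieveArr G M k) else sieveArr G M k

theorem length_sieveArr (G : List Int) (M : Int) (k : Nat) :
    (sieveArr G M k).length = (M + 1).toNat := by
  induction k with
  | zero => simp [sieveArr, PySem.List.length_pySetD]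
  | succ k ih =>
    rw [sieveArr]
    split
    · rw [length_sieveStep, ih]
    · exact ih

theorem sieveArr_getD (G : List Int) (M : Int) (hG : ∀ g ∈ G, 0 ≤ g) (hM : 0 ≤ M) :
    ∀ (k : Nat), (k : Int) ≤ M + 1 → ∀ j : Int, 0 ≤ j →
      (PySem.List.pyGetD (sieveArr G M k) j false = true ↔
        (j = 0 ∨ ∃ m g, 0 ≤ m ∧ m < (k : Int) ∧ Reach G m ∧ g ∈ G ∧ m + g ≤ M ∧ j = m + g)) := by
  intro k
  induction k with
  | zero =>
    intro _ j hj
    show PySem.List.pyGetD (PySem.List.pySetD (List.replicate (M + 1).toNat false) 0 true) j false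
        = true ↔ _
    rw [getD_pySetD_int _ 0 j true false le_rfl (by simp; omega) hj]
    by_cases hj0 : j = 0
    · simp [hj0]
    · rw [if_neg hj0]
      constructor
      · intro h
        exfalso
        rw [PySem.List.pyGetD_of_nonneg _ false hj, List.getD_eq_getElem?_getD,
          List.getElem?_replicate] at h
        have hfalse : (if j.toNat < (M + 1).toNat then some false else none).getD false = false := by
          split <;> rfl
        rw [hfalse] at h
        exact Bool.false_ne_true h
      · rintro (h | ⟨m, g, hm0, hmk, _⟩)
        · exact absurd h hj0
        · exfalso; push_cast at hmk; omega
  | succ k ihk =>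
    intro hk j hj
    have hkM : (k : Int) ≤ M := by push_cast at hk; omega
    have ihk' := ihk (by omega)
    have hlen : ((sieveArr G M k).length : Int) = M + 1 := by
      rw [length_sieveArr]; omega
    rw [sieveArr]
    by_cases hb : PySem.List.pyGetD (sieveArr G M k) (k : Int) false = true
    · rw [if_pos hb]
      have hRk : Reach G (k : Int) := by
        rcases (ihk' (k : Int) (by positivity)).mp hb with h0 | ⟨m, g, _, _, hRm, hg, _, hjeq⟩
        · rw [h0]; exact Reach.zero
        · rw [hjeq]; exact Reach.step hRm hg
      rw [getD_sieveStep G M hG (k : Int) (by positivity) _ hlen j hj, ihk' j hj]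
      constructor
      · rintro (h | ⟨g, hg, hle, rfl⟩)
        · rcases h with h0 | ⟨m, g, h1, h2, h3, h4, h5, h6⟩
          · exact Or.inl h0
          · exact Or.inr ⟨m, g, h1, by push_cast; omega, h3, h4, h5, h6⟩
        · exact Or.inr ⟨(k : Int), g, by positivity, by push_cast; omega, hRk, hg, hle, rfl⟩
      · rintro (h0 | ⟨m, g, hm0, hmk1, hRm, hg, hle, rfl⟩)
        · exact Or.inl (Or.inl h0)
        · by_cases hmk : m < (k : Int)
          · exact Or.inl (Or.inr ⟨m, g, hm0, hmk, hRm, hg, hle, rfl⟩)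
          · have hmeq : m = (k : Int) := by push_cast at hmk1; omega
            subst hmeq
            exact Or.inr ⟨g, hg, hle, rfl⟩
    · rw [if_neg hb]
      rw [ihk' j hj]
      constructor
      · rintro (h0 | ⟨m, g, hm0, hmk, hRm, hg, hle, rfl⟩)
        · exact Or.inl h0
        · exact Or.inr ⟨m, g, hm0, by push_cast; omega, hRm, hg, hle, rfl⟩
      · rintro (h0 | ⟨m, g, hm0, hmk1, hRm, hg, hle, rfl⟩)
        · exact Or.inl h0
        · by_cases hmk : m < (k : Int)
          · exact Or.inr ⟨m, g, hm0, hmk, hRm, hg, hle, rfl⟩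
          · have hmeq : m = (k : Int) := by push_cast at hmk1; omega
            subst hmeq
            exfalso
            apply hb
            rw [ihk' _ hm0]
            rcases reach_strip hG hRm with h0' | ⟨m', g', hRm', hg', hgpos, heq⟩
            · exact Or.inl h0'
            · exact Or.inr ⟨m', g', reach_nonneg hG hRm', by omega, hRm', hg', by omega, heq⟩

theorem sieveArr_final (G : List Int) (M : Int) (hG : ∀ g ∈ G, 0 ≤ g) (hM : 0 ≤ M)
    (j : Int) (hj : 0 ≤ j) :
    (PySem.List.pyGetD (sieveArr G M (M + 1).toNat) j false = true ↔ (Reach G j ∧ j ≤ M)) := by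
  have hcast : (((M + 1).toNat : Nat) : Int) = M + 1 := Int.toNat_of_nonneg (by omega)
  rw [sieveArr_getD G M hG hM (M + 1).toNat (by omega) j hj]
  constructor
  · rintro (h0 | ⟨m, g, _, _, hRm, hg, hle, rfl⟩)
    · subst h0; exact ⟨Reach.zero, hM⟩
    · exact ⟨Reach.step hRm hg, hle⟩
  · rintro ⟨hR, hle⟩
    rcases reach_strip hG hR with h0 | ⟨m, g, hRm, hg, hgpos, rfl⟩
    · exact Or.inl h0
    · exact Or.inr ⟨m, g, reach_nonneg hG hRm, by omega, hRm, hg, by omega, rfl⟩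

-- ----- assembly -----

theorem generate_semigroup_eq (a : Int) (t : List Int) (lf : Int) :
    generate_semigroup (a :: t) lf
      = PySem.List.sorted
          (bfsA (a :: t) (t.foldl max a * lf)
            (((a :: t).length + 1) * (t.foldl max a * lf + 1).toNat + 2) [0] PySem.Set.empty)
          (fun y => y) := by
  unfold generate_semigroup
  split
  · next m0 mx heq1 heq2 =>
    rw [PySem.List.max?_id_cons] at heq2
    cases heq2
    rfl
  · next h1 =>
    exact (h1 _ _ (PySem.List.min?_id_cons a t) (PySem.List.max?_id_cons a t)).elim

theorem generate_semigroup_alt_eq (a : Int) (t : List Int) (lf : Int) :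
    generate_semigroup_alt (a :: t) lf
      = if t.foldl max a * lf < 0 then []
        else
          PySem.Set.ofList
            ((PySem.List.pyRange 0 (t.foldl max a * lf + 1)).filter
              (fun i => PySem.List.pyGetD
                (sieveArr (a :: t) (t.foldl max a * lf) (t.foldl max a * lf + 1).toNat) i false)) := by
  have harr : ∀ (n : Nat),
      ((List.range n).map (fun u : Nat => (u : Int))).foldl
        (fun a2 i => if PySem.List.pyGetD a2 i false then sieveStep (a :: t) (t.foldl max a * lf) i a2 else a2)
        (PySem.List.pySetD (List.replicate (t.foldl max a * lf + 1).toNat false) 0 true)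
        = sieveArr (a :: t) (t.foldl max a * lf) n := by
    intro n
    induction n with
    | zero => rfl
    | succ n ihn =>
      rw [List.range_succ, List.map_append, List.foldl_append, ihn]
      rfl
  have step1 : generate_semigroup_alt (a :: t) lf
      = (if t.foldl max a * lf < 0 then []
         else
           PySem.Set.ofList
             ((PySem.List.pyRange 0 (t.foldl max a * lf + 1)).filter
               (fun i => PySem.List.pyGetD
                 ((PySem.List.pyRange 0 (t.foldl max a * lf + 1)).foldl
                   (fun a2 i => if PySem.List.pyGetD a2 i false then sieveStep (a :: t) (t.foldl max a * lf) i a2 else a2)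
                   (PySem.List.pySetD (List.replicate (t.foldl max a * lf + 1).toNat false) 0 true))
                 i false))) := by
    unfold generate_semigroup_alt
    split
    · next heq =>
      rw [PySem.List.max?_id_cons] at heq
      cases heq
    · next mx heq =>
      rw [PySem.List.max?_id_cons] at heq
      cases heq
      rfl
  rw [step1]
  by_cases hM : t.foldl max a * lf < 0
  · rw [if_pos hM, if_pos hM]
  · rw [if_neg hM, if_neg hM, PySem.List.pyRange_zero, harr, ← PySem.List.pyRange_zero]

theorem generate_semigroup_spec : Claim_equal_generate_semigroup := by
  unfold Claim_equal_generate_semigroup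
  intro G lf _ hPre
  unfold Spec_generate_semigroup
  obtain ⟨hne, hP2⟩ := hPre
  cases G with
  | nil => exact absurd rfl hne
  | cons a t =>
    set mx := t.foldl max a with hmx
    set M := mx * lf with hMdef
    rw [generate_semigroup_eq, generate_semigroup_alt_eq]
    by_cases hM : M < 0
    · rw [if_pos hM, bfsA_of_neg _ _ hM]
      rfl
    · rw [not_lt] at hM
      rw [if_neg (not_lt.mpr hM)]
      have hG : ∀ g ∈ (a :: t), 0 ≤ g := by
        rcases hP2 with h | h
        · exact h
        · exfalso
          rw [PySem.List.max?_id_cons] at h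
          simp only [Option.getD_some] at h
          exact absurd h (not_lt.mpr hM)
      obtain ⟨hmem, hnd⟩ := bfsA_spec (a :: t) M hG
      set L := (PySem.List.pyRange 0 (M + 1)).filter
        (fun i => PySem.List.pyGetD (sieveArr (a :: t) M (M + 1).toNat) i false) with hL
      have hLpair : L.Pairwise (· < ·) :=
        (PySem.List.pairwise_lt_pyRange_one 0 (M + 1)).filter _
      have hLnd : L.Nodup := hLpair.imp (fun h => ne_of_lt h)
      have hLmem : ∀ x, x ∈ L ↔ (Reach (a :: t) x ∧ x ≤ M) := by
        intro x
        constructor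
        · intro hx
          obtain ⟨hx1, hx2⟩ := List.mem_filter.mp hx
          have hx1' := PySem.List.mem_pyRange_one.mp hx1
          exact (sieveArr_final _ M hG hM x hx1'.1).mp (by simpa using hx2)
        · rintro ⟨hR, hle⟩
          have hx0 : 0 ≤ x := reach_nonneg hG hR
          exact List.mem_filter.mpr
            ⟨PySem.List.mem_pyRange_one.mpr ⟨hx0, by omega⟩,
             by simpa using (sieveArr_final _ M hG hM x hx0).mpr ⟨hR, hle⟩⟩
      rw [PySem.Set.ofList_eq_self_of_nodup L hLnd]
      have hperm : L.Perm
          (bfsA (a :: t) M (((a :: t).length + 1) * (M + 1).toNat + 2) [0] PySem.Set.empty) :=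
        (List.perm_ext_iff_of_nodup hLnd hnd).mpr (fun x => (hLmem x).trans (hmem x).symm)
      exact PySem.List.sorted_eq_of_perm_of_pairwise_lt _ L _ hperm hLpair
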